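-- pv_equiv track=rewrite | github.com/pratikvadlamudi/ehr-to-rd | screening.py | format_extnlpAbnormalities
-- ===== SOURCE A (Python) =====
-- def format_extnlpAbnormalities(abnrml):
--   values = []
--
--   for i in range(55):
--     values.append('')
--
--   if (abnrml == "yes" or abnrml == "Yes"): #extnlpnorm thru extnabnrmothtx
--     values[0] = '1'
--   else:
--     if abnrml == 'No; Lens; Cataract; OD; cataract is not visually significant':
--       values[0]='0' #extnlpnorm
--       values[1]='1' #extnlpabnrmloc__1
--       values[8]='1' #lensabnrm___2 (cataract)
--       values[12]='1' #cataracteye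
--       values[13]='1' #cataract
--     elif abnrml == 'No; Lens; Cataract; OD; cataract is visually significant and needs referral for further evaluation':
--       values[0]='0'
--       values[1]='1'
--       values[8]='1'
--       values[12]='1'
--       values[13]='2'
--     elif abnrml == 'No; Lens; Cataract; OS; cataract is not visually significant':
--       values[0]='0'
--       values[1]='1'
--       values[8]='1'
--       values[12]='2'
--       values[13]='1'
--     elif abnrml == 'No; Lens; Cataract; OS; cataract is visually significant and needs referral for further evaluation':
--       values[0]='0'
--       values[1]='1'
--       values[8]='1'
--       values[12]='2'
--       values[13]='2'
--     elif abnrml == 'No; Lens; Cataract; OU; cataract is not visually significant':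
--       values[0]='0'
--       values[1]='1'
--       values[8]='1'
--       values[12]='3'
--       values[13]='1'
--     elif abnrml == 'No; Lens; Cataract; OU; cataract is visually significant and needs referral for further evaluation':
--       values[0]='0'
--       values[1]='1'
--       values[8]='1'
--       values[12]='3'
--       values[13]='2'
--     elif abnrml == 'No; Lens; Intraocular lens; OU':
--       values[0]='0'
--       values[1]='1'
--       values[7]='1' #lensabnrm___1 (intraocular)
--       values[10]='3' #intraocirlneye
--     elif abnrml == "No; Lens; Intraocular lens; OD":
--       values[0]='0'
--       values[1]='1'
--       values[7]='1' #lensabnrm___1 (intraocular)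
--       values[10]='1' #intraocirlneye
--     elif abnrml == "No; Lens; Intraocular lens; OS":
--       values[0]='0'
--       values[1]='1'
--       values[7]='1' #lensabnrm___1 (intraocular)
--       values[10]='2' #intraocirlneye
--     else:
--       values[0]='MANUAL: '+ abnrml
--       for i in range(54): #extnlpabnrmloc thru extnabnrmothtx needs to be marked with MANUAL
--         values[i+1] = 'MANUAL: see left'
--
--   return values
-- ===== SOURCE B (Python) =====
-- # Parse-and-derive re-implementation: instead of matching whole strings against
-- # nine literal rows, B recognizes the two structured prefixes, parses the eye and
-- # severity components out of the remainder, and derives the codes from them.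
-- EYE = {'OD': '1', 'OS': '2', 'OU': '3'}
-- SIG = {'; cataract is not visually significant': '1',
--        '; cataract is visually significant and needs referral for further evaluation': '2'}
--
-- def format_extnlpAbnormalities(abnrml):
--     if abnrml in ('yes', 'Yes'):
--         return ['1'] + [''] * 54
--     if abnrml.startswith('No; Lens; Cataract; '):
--         rest = abnrml[20:]
--         eye, sig = rest[:2], rest[2:]
--         if eye in EYE and sig in SIG:
--             return (['0', '1'] + [''] * 6 + ['1'] + [''] * 3
--                     + [EYE[eye], SIG[sig]] + [''] * 41)
--     elif abnrml.startswith('No; Lens; Intraocular lens; '):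
--         eye = abnrml[28:]
--         if eye in EYE:
--             return (['0', '1'] + [''] * 5 + ['1'] + [''] * 2
--                     + [EYE[eye]] + [''] * 44)
--     return ['MANUAL: ' + abnrml] + ['MANUAL: see left'] * 54
-- ===== Notes on version B (the rewrite author's own statement) =====
-- stated objective: alternative
-- what changed: B recognizes the two structured prefixes ('No; Lens; Cataract; ' / 'No; Lens; Intraocular lens; '), slices the eye and severity components out of the remainder and derives the codes from those parts, returning each row as a literal list, instead of A's nine-branch whole-string equality cascade mutating a loop-built blank list.
import Mathlib
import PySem

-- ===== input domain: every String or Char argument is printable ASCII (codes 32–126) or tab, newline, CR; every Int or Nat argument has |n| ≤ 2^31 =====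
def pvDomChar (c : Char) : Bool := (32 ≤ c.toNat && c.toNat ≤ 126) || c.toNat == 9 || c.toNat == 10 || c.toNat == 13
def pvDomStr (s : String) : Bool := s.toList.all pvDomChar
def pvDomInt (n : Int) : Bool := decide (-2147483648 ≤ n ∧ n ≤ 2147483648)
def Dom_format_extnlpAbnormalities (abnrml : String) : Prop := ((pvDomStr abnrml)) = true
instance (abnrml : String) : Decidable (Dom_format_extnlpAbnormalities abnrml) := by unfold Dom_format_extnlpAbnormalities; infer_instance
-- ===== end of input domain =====

-- B parses the two structured prefixes and derives the row's codes from the sliced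
-- eye/severity components instead of A's whole-string equality cascade (objective: alternative).

-- ===== PORT A =====
-- literal port of A: build [''] * 55 by appending, then the if/elif cascade of in-place sets;
-- the MANUAL branch loops i in range(54) setting values[i+1].
def pvInit : List String :=
  (PySem.List.pyRange 0 55 1).foldl (fun vs _ => vs ++ [""]) []

def format_extnlpAbnormalities (abnrml : String) : List String :=
  let values : List String := pvInit
  if abnrml = "yes" ∨ abnrml = "Yes" then
    values.set 0 "1"
  else if abnrml = "No; Lens; Cataract; OD; cataract is not visually significant" then
    ((((values.set 0 "0").set 1 "1").set 8 "1").set 12 "1").set 13 "1"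
  else if abnrml = "No; Lens; Cataract; OD; cataract is visually significant and needs referral for further evaluation" then
    ((((values.set 0 "0").set 1 "1").set 8 "1").set 12 "1").set 13 "2"
  else if abnrml = "No; Lens; Cataract; OS; cataract is not visually significant" then
    ((((values.set 0 "0").set 1 "1").set 8 "1").set 12 "2").set 13 "1"
  else if abnrml = "No; Lens; Cataract; OS; cataract is visually significant and needs referral for further evaluation" then
    ((((values.set 0 "0").set 1 "1").set 8 "1").set 12 "2").set 13 "2"
  else if abnrml = "No; Lens; Cataract; OU; cataract is not visually significant" then
    ((((values.set 0 "0").set 1 "1").set 8 "1").set 12 "3").set 13 "1"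
  else if abnrml = "No; Lens; Cataract; OU; cataract is visually significant and needs referral for further evaluation" then
    ((((values.set 0 "0").set 1 "1").set 8 "1").set 12 "3").set 13 "2"
  else if abnrml = "No; Lens; Intraocular lens; OU" then
    (((values.set 0 "0").set 1 "1").set 7 "1").set 10 "3"
  else if abnrml = "No; Lens; Intraocular lens; OD" then
    (((values.set 0 "0").set 1 "1").set 7 "1").set 10 "1"
  else if abnrml = "No; Lens; Intraocular lens; OS" then
    (((values.set 0 "0").set 1 "1").set 7 "1").set 10 "2"
  else
    let values := values.set 0 ("MANUAL: " ++ abnrml)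
    (PySem.List.pyRange 0 54 1).foldl
      (fun vs i => vs.set (i + 1).toNat "MANUAL: see left") values

-- ===== PORT B =====
-- port of Source B: recognize the two structured prefixes, slice out the eye / severity
-- components, derive the codes from them, and return the row as a literal list.
def pvEYE : PySem.Dict String String :=
  PySem.Dict.ofList [("OD", "1"), ("OS", "2"), ("OU", "3")]

def pvSIG : PySem.Dict String String :=
  PySem.Dict.ofList
    [("; cataract is not visually significant", "1"),
     ("; cataract is visually significant and needs referral for further evaluation", "2")]

def format_extnlpAbnormalities_alt (abnrml : String) : List String :=
  if abnrml = "yes" ∨ abnrml = "Yes" then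
    ["1"] ++ List.replicate 54 ""
  else
    -- the shared final 'return' both failed branches fall through to
    let manual := ["MANUAL: " ++ abnrml] ++ List.replicate 54 "MANUAL: see left"
    if PySem.Str.startswith abnrml "No; Lens; Cataract; " then
      let rest := PySem.Str.slice abnrml (some 20) none
      let eye := PySem.Str.slice rest none (some 2)
      let sig := PySem.Str.slice rest (some 2) none
      if pvEYE.contains eye && pvSIG.contains sig then
        ["0", "1"] ++ List.replicate 6 "" ++ ["1"] ++ List.replicate 3 ""
          ++ [pvEYE.getD eye "", pvSIG.getD sig ""] ++ List.replicate 41 ""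
      else manual
    else if PySem.Str.startswith abnrml "No; Lens; Intraocular lens; " then
      let eye := PySem.Str.slice abnrml (some 28) none
      if pvEYE.contains eye then
        ["0", "1"] ++ List.replicate 5 "" ++ ["1"] ++ List.replicate 2 ""
          ++ [pvEYE.getD eye ""] ++ List.replicate 44 ""
      else manual
    else manual

-- ===== PRECONDITION & SPEC =====
def Spec_format_extnlpAbnormalities (abnrml : String) (out : List String) : Prop := out = format_extnlpAbnormalities_alt abnrml
instance (abnrml : String) (out : List String) : Decidable (Spec_format_extnlpAbnormalities abnrml out) := by unfold Spec_format_extnlpAbnormalities; infer_instance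

-- ===== CLAIM (what is proved, stated in full; the proofs are below) =====
def Claim_equal_format_extnlpAbnormalities : Prop := ∀ (abnrml : String), Dom_format_extnlpAbnormalities abnrml → Spec_format_extnlpAbnormalities abnrml (format_extnlpAbnormalities abnrml)

-- ===== LEMMAS AND PROOFS =====

theorem pvInit_eq : pvInit = "" :: List.replicate 54 "" := by decide

-- the MANUAL loop: setting indices 1..54 of a 55-list leaves the head alone
theorem pvManualFold (x : String) :
    (PySem.List.pyRange 0 54 1).foldl
        (fun vs i => vs.set (i + 1).toNat "MANUAL: see left")
        (x :: List.replicate 54 "")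
      = x :: List.replicate 54 "MANUAL: see left" := by
  have h2 : ∀ (ns : List Int) (l : List String), (∀ n ∈ ns, 0 ≤ n) →
      ns.foldl (fun vs i => vs.set (i + 1).toNat "MANUAL: see left") (x :: l)
        = x :: ns.foldl (fun vs i => vs.set i.toNat "MANUAL: see left") l := by
    intro ns
    induction ns with
    | nil => intro l _; rfl
    | cons a t ih =>
        intro l hpos
        simp only [List.foldl_cons]
        have ha : (a + 1).toNat = a.toNat + 1 := by
          have := hpos a (List.mem_cons_self)
          omega
        rw [ha, List.set_cons_succ]
        exact ih _ (fun n hn => hpos n (List.mem_cons_of_mem _ hn))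
  have h1 : PySem.List.pyRange 0 54 1 = [(0 : Int), (1 : Int), (2 : Int), (3 : Int), (4 : Int), (5 : Int), (6 : Int), (7 : Int), (8 : Int), (9 : Int), (10 : Int), (11 : Int), (12 : Int), (13 : Int), (14 : Int), (15 : Int), (16 : Int), (17 : Int), (18 : Int), (19 : Int), (20 : Int), (21 : Int), (22 : Int), (23 : Int), (24 : Int), (25 : Int), (26 : Int), (27 : Int), (28 : Int), (29 : Int), (30 : Int), (31 : Int), (32 : Int), (33 : Int), (34 : Int), (35 : Int), (36 : Int), (37 : Int), (38 : Int), (39 : Int), (40 : Int), (41 : Int), (42 : Int), (43 : Int), (44 : Int), (45 : Int), (46 : Int), (47 : Int), (48 : Int), (49 : Int), (50 : Int), (51 : Int), (52 : Int), (53 : Int)] := by decide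
  rw [h1, h2 _ _ (by decide)]
  have h4 : ([(0 : Int), (1 : Int), (2 : Int), (3 : Int), (4 : Int), (5 : Int), (6 : Int), (7 : Int), (8 : Int), (9 : Int), (10 : Int), (11 : Int), (12 : Int), (13 : Int), (14 : Int), (15 : Int), (16 : Int), (17 : Int), (18 : Int), (19 : Int), (20 : Int), (21 : Int), (22 : Int), (23 : Int), (24 : Int), (25 : Int), (26 : Int), (27 : Int), (28 : Int), (29 : Int), (30 : Int), (31 : Int), (32 : Int), (33 : Int), (34 : Int), (35 : Int), (36 : Int), (37 : Int), (38 : Int), (39 : Int), (40 : Int), (41 : Int), (42 : Int), (43 : Int), (44 : Int), (45 : Int), (46 : Int), (47 : Int), (48 : Int), (49 : Int), (50 : Int), (51 : Int), (52 : Int), (53 : Int)] : List Int).foldl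
      (fun vs i => vs.set i.toNat "MANUAL: see left")
      (List.replicate 54 "") = List.replicate 54 "MANUAL: see left" := by decide
  rw [h4]

-- prefix + the dropped remainder reconstruct the string
theorem pvPrefDrop {p L : List Char} (h : p <+: L) : L = p ++ L.drop p.length := by
  obtain ⟨t, rfl⟩ := h
  simp

theorem pvEYE_contains (s : String) (h : pvEYE.contains s = true) :
    s = "OD" ∨ s = "OS" ∨ s = "OU" := by
  rw [PySem.Dict.contains_iff_mem_keys] at h
  have hk : pvEYE.keys = ["OD", "OS", "OU"] := by decide
  rw [hk] at h
  simpa using h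

theorem pvSIG_contains (s : String) (h : pvSIG.contains s = true) :
    s = "; cataract is not visually significant" ∨
    s = "; cataract is visually significant and needs referral for further evaluation" := by
  rw [PySem.Dict.contains_iff_mem_keys] at h
  have hk : pvSIG.keys = ["; cataract is not visually significant",
      "; cataract is visually significant and needs referral for further evaluation"] := by decide
  rw [hk] at h
  simpa using h

-- on a string that is none of the nine codes (and not yes/Yes), B falls through to MANUAL
theorem pvAltManual (abnrml : String)
    (h0 : ¬ (abnrml = "yes" ∨ abnrml = "Yes"))
    (h1 : abnrml ≠ "No; Lens; Cataract; OD; cataract is not visually significant")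
    (h2 : abnrml ≠ "No; Lens; Cataract; OD; cataract is visually significant and needs referral for further evaluation")
    (h3 : abnrml ≠ "No; Lens; Cataract; OS; cataract is not visually significant")
    (h4 : abnrml ≠ "No; Lens; Cataract; OS; cataract is visually significant and needs referral for further evaluation")
    (h5 : abnrml ≠ "No; Lens; Cataract; OU; cataract is not visually significant")
    (h6 : abnrml ≠ "No; Lens; Cataract; OU; cataract is visually significant and needs referral for further evaluation")
    (h7 : abnrml ≠ "No; Lens; Intraocular lens; OU")
    (h8 : abnrml ≠ "No; Lens; Intraocular lens; OD")
    (h9 : abnrml ≠ "No; Lens; Intraocular lens; OS") :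
    format_extnlpAbnormalities_alt abnrml
      = ["MANUAL: " ++ abnrml] ++ List.replicate 54 "MANUAL: see left" := by
  unfold format_extnlpAbnormalities_alt
  rw [if_neg h0]
  by_cases hc : PySem.Str.startswith abnrml "No; Lens; Cataract; " = true
  · simp only [hc, if_pos]
    have hpref : "No; Lens; Cataract; ".toList <+: abnrml.toList := by
      simpa [PySem.Str.startswith_eq, PySem.Chars.startswith_iff] using hc
    have hL : abnrml.toList = "No; Lens; Cataract; ".toList ++ abnrml.toList.drop 20 :=
      pvPrefDrop hpref
    have hg : ¬ ((pvEYE.contains (PySem.Str.slice (PySem.Str.slice abnrml (some 20) none) none (some 2)) &&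
        pvSIG.contains (PySem.Str.slice (PySem.Str.slice abnrml (some 20) none) (some 2) none)) = true) := by
      intro hgt
      rw [Bool.and_eq_true] at hgt
      have heye := pvEYE_contains _ hgt.1
      have hsig := pvSIG_contains _ hgt.2
      have heyeL : (abnrml.toList.drop 20).take 2
          = (PySem.Str.slice (PySem.Str.slice abnrml (some 20) none) none (some 2)).toList := by
        simp [PySem.Str.toList_slice, PySem.List.slice_from, PySem.List.slice_to]
      have hsigL : (abnrml.toList.drop 20).drop 2
          = (PySem.Str.slice (PySem.Str.slice abnrml (some 20) none) (some 2) none).toList := by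
        simp [PySem.Str.toList_slice, PySem.List.slice_from]
      have hsplit : abnrml.toList = "No; Lens; Cataract; ".toList
          ++ ((abnrml.toList.drop 20).take 2 ++ (abnrml.toList.drop 20).drop 2) := by
        rw [List.take_append_drop]; exact hL
      rcases heye with he | he | he <;> rcases hsig with hs | hs <;>
        [skip; skip; skip; skip; skip; skip] <;>
      · rw [heyeL, he, hsigL, hs] at hsplit
        first
        | exact h1 (String.toList_inj.mp hsplit)
        | exact h2 (String.toList_inj.mp hsplit)
        | exact h3 (String.toList_inj.mp hsplit)
        | exact h4 (String.toList_inj.mp hsplit)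
        | exact h5 (String.toList_inj.mp hsplit)
        | exact h6 (String.toList_inj.mp hsplit)
    rw [if_neg hg]
  · simp only [Bool.not_eq_true] at hc
    simp only [hc, Bool.false_eq_true, if_false]
    by_cases hi : PySem.Str.startswith abnrml "No; Lens; Intraocular lens; " = true
    · simp only [hi, if_pos]
      have hpref : "No; Lens; Intraocular lens; ".toList <+: abnrml.toList := by
        simpa [PySem.Str.startswith_eq, PySem.Chars.startswith_iff] using hi
      have hL : abnrml.toList = "No; Lens; Intraocular lens; ".toList ++ abnrml.toList.drop 28 :=
        pvPrefDrop hpref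
      have hg : ¬ (pvEYE.contains (PySem.Str.slice abnrml (some 28) none) = true) := by
        intro hgt
        have heye := pvEYE_contains _ hgt
        have heyeL : abnrml.toList.drop 28 = (PySem.Str.slice abnrml (some 28) none).toList := by
          simp [PySem.Str.toList_slice, PySem.List.slice_from]
        rw [heyeL] at hL
        rcases heye with he | he | he <;> rw [he] at hL
        · exact h8 (String.toList_inj.mp hL)
        · exact h9 (String.toList_inj.mp hL)
        · exact h7 (String.toList_inj.mp hL)
      rw [if_neg hg]
    · simp only [Bool.not_eq_true] at hi
      simp only [hi, Bool.false_eq_true, if_false]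

-- ===== VERDICT (by name: the statement is the Claim_ definition above) =====
set_option maxHeartbeats 4000000 in
theorem format_extnlpAbnormalities_spec : Claim_equal_format_extnlpAbnormalities := by
  intro abnrml _
  show format_extnlpAbnormalities abnrml = format_extnlpAbnormalities_alt abnrml
  by_cases h0 : abnrml = "yes" ∨ abnrml = "Yes"
  · rcases h0 with h | h <;> rw [h] <;> decide
  by_cases h1 : abnrml = "No; Lens; Cataract; OD; cataract is not visually significant"
  · rw [h1]; decide
  by_cases h2 : abnrml = "No; Lens; Cataract; OD; cataract is visually significant and needs referral for further evaluation"
  · rw [h2]; decide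
  by_cases h3 : abnrml = "No; Lens; Cataract; OS; cataract is not visually significant"
  · rw [h3]; decide
  by_cases h4 : abnrml = "No; Lens; Cataract; OS; cataract is visually significant and needs referral for further evaluation"
  · rw [h4]; decide
  by_cases h5 : abnrml = "No; Lens; Cataract; OU; cataract is not visually significant"
  · rw [h5]; decide
  by_cases h6 : abnrml = "No; Lens; Cataract; OU; cataract is visually significant and needs referral for further evaluation"
  · rw [h6]; decide
  by_cases h7 : abnrml = "No; Lens; Intraocular lens; OU"
  · rw [h7]; decide
  by_cases h8 : abnrml = "No; Lens; Intraocular lens; OD"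
  · rw [h8]; decide
  by_cases h9 : abnrml = "No; Lens; Intraocular lens; OS"
  · rw [h9]; decide
  rw [pvAltManual abnrml h0 h1 h2 h3 h4 h5 h6 h7 h8 h9]
  unfold format_extnlpAbnormalities
  rw [if_neg h0, if_neg h1, if_neg h2, if_neg h3, if_neg h4, if_neg h5, if_neg h6,
      if_neg h7, if_neg h8, if_neg h9]
  show (PySem.List.pyRange 0 54 1).foldl
      (fun vs i => vs.set (i + 1).toNat "MANUAL: see left")
      (pvInit.set 0 ("MANUAL: " ++ abnrml)) = _
  rw [pvInit_eq]
  show (PySem.List.pyRange 0 54 1).foldl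
      (fun vs i => vs.set (i + 1).toNat "MANUAL: see left")
      (("MANUAL: " ++ abnrml) :: List.replicate 54 "") = _
  rw [pvManualFold]
  rfl
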